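/- GENERATED by tools/from_farm_form.py from prooffarm-gif/accepted/gif_decode.4/Lemmas.lean (a worked proof of the farm's unit `gif_decode.4`,
   accepted by the verdict) — do not edit. -/
import Gif.Spec.Units.gif_decode_4
import Gif.Spec.AllSegs

/-!
  Lemmas for the unit `gif_decode.4` (0x10af77 … 0x10af93, gif_driver.c:220): `report->digest = digest_file(gif, &report->pixels)`.
  A body segment of the driver's protected function BEHIND DGifOpen: the assertion `Held` = `Open` (`Core`, the present heap `Hc` with
  its invariant, the state invariant `GifOK Hc Fc (reader e)`, `Fc.Complete`) and `rbp = gif`. Neither the heap nor the forest changes.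
  digest_file's return address 0x10af83 (`ret26`) is not a cut of the design: the unit uses `Held` at `ret26` as its own cut.

      gd4_Win          a window this segment writes: the stack BELOW THE CURSOR `[RA − 992, RA − 72)`, or inside the report
      gd4_open_carry   `Open` at a later state from a footprint of `gd4_Win`s (pure: `Core.carry`, `HeapInv.stack_windows`,
                       `GifOK.sameExcept` with `Loose.stack` / `Loose.offHeap`)
      gd4_seg_call     0x10af77 … `call digest_file` … 0x10af83 (`Held` at `ret26`)
      gd4_seg_tail     0x10af83 … `r14 = rax`, the checked 8-byte store `report->digest` … 0x10af93 (`Held`)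

  THE CLAUSES OF digest_file'S PRE at the call (`pre_10af7e`), from `Held`:
      Env        `HeapPre.at_call` (the present heap `Hc`, `Open.region`), `gif_decode.ctx`, `GifOK.sameExcept` over the pushed
                 return address (`Loose.stack`: below the cursor)
      Complete   `Open.complete`;   rdi: `Held.rbp`;   the 8 bytes at `report + 40`: `gif_decode.reportLive` and the pre's bounds
-/

open X86 X86.User Asan ProgX.Base ProgX.Base.Spec Gif.Spec

namespace Gif.Spec.gif_decode_4

/-- **A WINDOW THIS SEGMENT WRITES**: the function's stack BELOW THE CURSOR (`[RA − 992, RA − 72)`: the pushed return addresses,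
digest_file's frame) or inside the report `[report, report + 64)` (a caller's stack object, at or above `RA + 8`). Both are
`gif_decode.BodyWin`s, lie in the stack region, and are `Loose` for the reader of this frame (cursor at RA − 72). -/
def gd4_Win (e : State) (x : Span) : Prop :=
  ((e.reg .rsp).toNat - 992 ≤ x.lo ∧ x.hi ≤ (e.reg .rsp).toNat - 72) ∨
  ((e.reg .rdx).toNat ≤ x.lo ∧ x.hi ≤ (e.reg .rdx).toNat + 64)

/-- **`Open` AT A LATER STATE OF THE BODY**, the heap `Hc` and the forest `Fc` unchanged: the registers `Core` names as they were and
a footprint of `gd4_Win`s. `Core` by `gif_decode.Core.carry`; the heap's invariant by `HeapInv.stack_windows` (every window lies in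
`[700000H, 800000H)`); the state invariant by `GifOK.sameExcept`: a stack window below the cursor is `Loose.stack`, a window of the
report `Loose.offHeap` (below the heap's base, above the cursor's 16 bytes by `report_above`, above the constants). -/
theorem gd4_open_carry {cut cut' : Word} {H : Heap} {rest : List Obj} {frames : List (Nat × FrameLayout)} {Hc : Heap} {Fc : Forest}
    {u₀ e : State} {ret : Word} {v w : State} {ws : List Span}
    (ho : gif_decode.Open cut H rest frames Hc Fc u₀ e ret v)
    (hrip : w.rip = cut') (hrsp : w.reg .rsp = e.reg .rsp - 136)
    (hr12 : w.reg .r12 = v.reg .r12) (hr13 : w.reg .r13 = v.reg .r13) (hrbx : w.reg .rbx = v.reg .rbx)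
    (hr15 : w.reg .r15 = v.reg .r15)
    (hsame : Mem.SameExcept ws v.mem w.mem) (hws : ∀ x, x ∈ ws → gd4_Win e x)
    (hcode : (conv u₀).code.In w.mem) (habi : (conv u₀).inv w) :
    gif_decode.Open cut' H rest frames Hc Fc u₀ e ret w := by
  have he_room := ho.core.entry.room
  have he_top := ho.core.entry.top
  simp only [vspec, ProgX.conv_stackLo, ProgX.conv_stackHi] at he_room he_top
  have hpre := ho.core.pre
  have hrab := gif_decode.report_above hpre
  obtain ⟨hheap, _, _, _, _, hrep_lo, hrep_hi⟩ := hpre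
  have hbase : Hc.base = 0x800000 := ho.region.1.trans hheap.base
  have hlimit : Hc.limit = 0xC00000 := ho.region.2.trans hheap.limit
  -- `Core`: every window is one of the body's
  have hcore' : gif_decode.Core cut' H rest frames u₀ e ret w := by
    refine ho.core.carry hrip hrsp hr12 hr13 hrbx hr15 hsame ?_ hcode habi
    intro x hx
    have hx' := hws x hx
    unfold gd4_Win at hx'
    unfold gif_decode.BodyWin
    omega
  -- the heap's invariant: every window lies in the stack region
  have hinv' : HeapInv Hc rest (gif_decode.framesIn frames e) ((e.reg .rsp).toNat - 136) w.mem := by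
    refine (ho.inv.stack_windows hbase hsame ?_).1
    intro x hx
    have hx' := hws x hx
    unfold gd4_Win at hx'
    omega
  -- the state invariant: every window is loose (stack below the cursor; the report: off the heap, above the cursor)
  have hok' : GifOK Hc Fc (gif_decode.reader e) w.mem := by
    refine ho.ok.sameExcept ho.inv.heap ?_ hsame ?_
    · show 0x700000 ≤ (e.reg .rsp).toNat - 72 ∧ (e.reg .rsp).toNat - 72 + 16 ≤ 0x800000
      omega
    · intro x hx
      have hx' := hws x hx
      unfold gd4_Win at hx'
      rcases hx' with ⟨h1, h2⟩ | ⟨h1, h2⟩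
      · refine Loose.stack ho.inv.heap (by omega) (by omega) ?_
        show x.hi ≤ (e.reg .rsp).toNat - 72
        exact h2
      · refine Loose.offHeap ho.inv.heap ?_ ?_ ?_
        · left
          rw [hbase]
          omega
        · right
          show (e.reg .rsp).toNat - 72 + 16 ≤ x.lo
          omega
        · right
          omega
  exact {
    core := hcore'
    region := ho.region
    inv := hinv'
    ok := hok'
    complete := ho.complete
  }

set_option maxRecDepth 4000 in
set_option maxHeartbeats 4000000 in
/-- **10AF77H … the call of digest_file … 10AF83H (ret26)** (gif_driver.c:220): `rsi = report + 40` (`&report->pixels`), `rdi = rbp = gif`.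
digest_file's precondition: see the file header. Behind the call: its footprint is 224 bytes of stack below the pushed return
address and `[report + 40, report + 48)`: two `gd4_Win`s; `Open` by `gd4_open_carry`; `rbp` is callee-saved. -/
theorem gd4_seg_call (Lay : Layout) (hLay : Lay.hi = 0x1000000) (μ : Microarch) (hμ : UserX.MicroOK μ) (u₀ : State)
    (hcode : HasCodeNat Lay u₀ Gif.L.gif_decode.entry Gif.Code.code_gif_decode.nat Gif.L.gif_decode.size)
    (H : Heap) (rest : List Obj) (frames : List (Nat × FrameLayout)) (Hc : Heap) (Fc : Forest) (e : State) (ret : Word)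
    (h_digest_file : Calls Lay μ ProgX.Base.WayInv (ProgX.Base.conv u₀) Gif.L.digest_file.entry
      (Gif.Spec.digest_file.spec Hc rest (gif_decode.framesIn frames e) Fc (gif_decode.reader e)))
    (v : State) (hat : gif_decode.Held Gif.L.gif_decode.at_10af77 H rest frames Hc Fc u₀ e ret v) :
    ReachVia Lay μ ProgX.Base.WayInv v (gif_decode.Held Gif.L.gif_decode.ret26 H rest frames Hc Fc u₀ e ret) := by
  obtain ⟨hopen, c_rbp⟩ := hat
  have hcore := hopen.core
  have hinv := hopen.inv
  have hok := hopen.ok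
  have hreg := hopen.region
  have he := hcore.entry
  v_entry he
  have hpre := hcore.pre
  obtain ⟨hheap, hglob, hconsts0, hin, hrep, hrep_lo, hrep_hi⟩ := hcore.pre
  have w_rip := hcore.rip
  have c_rsp : v.reg .rsp = e.reg .rsp - 136 := hcore.rsp
  have c_rbx : v.reg .rbx = e.reg .rdx := hcore.rbx
  have w_kept : RegsKept [.rsp] v v := RegsKept.refl _ _
  have w_eq : Mem.EqOn ProgX.Base.L.textLo ProgX.Base.L.textHi u₀.mem v.mem := ProgX.Base.conv_code_eqOn hcore.code
  have hdf := (show abiInv _ from hcore.abi).1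
  have hmx := (show abiInv _ from hcore.abi).2
  have hsse := ProgX.Base.sseOK_of_abiInv hcore.abi
  have hrab := gif_decode.report_above hpre
  u_walk hcode [hμ.vendor] until [Gif.L.gif_decode.ret26] span [ProgX.Base.L.textLo, ProgX.Base.L.textHi] side (v_side)
  case call_inv =>
    v_inv
  case pre_10af7e =>
    -- digest_file's precondition. One stack store since `v`: the pushed return address
    have hctx : Ctx rest (gif_decode.framesIn frames e) (gif_decode.reader e) := gif_decode.ctx hpre (by omega)
    have hs : Mem.SameExcept [⟨(e.reg .rsp).toNat - 992, (e.reg .rsp).toNat - 136⟩] v.mem s_10af7e.mem := by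
      rw [w_mem]
      u_same
    have hpre' : HeapPre Hc rest (gif_decode.framesIn frames e) s_10af7e := by
      refine HeapPre.at_call hheap hreg hinv hs (by omega) ?_ ?_ ?_
      · rw [w_rsp]
        u_omega
      · rw [w_rsp]
        u_omega
      · rw [w_rsp]
        u_omega
    have hok' : GifOK Hc Fc (gif_decode.reader e) s_10af7e.mem := by
      refine hok.sameExcept hinv.heap ?_ hs ?_
      · show 0x700000 ≤ (e.reg .rsp).toNat - 72 ∧ (e.reg .rsp).toNat - 72 + 16 ≤ 0x800000
        omega
      · intro x hx
        have hx_eq := List.mem_singleton.mp hx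
        rw [hx_eq]
        refine Loose.stack hinv.heap ?_ ?_ ?_
        · show 0x700000 ≤ (e.reg .rsp).toNat - 992
          omega
        · show (e.reg .rsp).toNat - 136 ≤ 0x800000
          omega
        · show (e.reg .rsp).toNat - 136 ≤ (e.reg .rsp).toNat - 72
          omega
    have e_rsi : (s_10af7e.reg .rsi).toNat = (e.reg .rdx).toNat + 40 := by
      rw [w_rsi]
      u_omega
    refine ⟨⟨hpre', hctx, hok'⟩, hopen.complete, ?_, ?_, ?_, ?_⟩
    · rw [w_rdi]
      exact c_rbp
    · rw [e_rsi]
      exact gif_decode.reportLive hpre Hc _ _ _ (by omega) (by omega)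
    · rw [e_rsi]
      omega
    · rw [e_rsi]
      omega
  -- 0x10af83 (ret26): digest_file has returned
  v_after_call w_rsp_10af7e w_mem_10af7e
  simp only [w_rsi_10af7e] at w_same
  have hsame1 : Mem.SameExcept
      [⟨(e.reg .rsp).toNat - 992, (e.reg .rsp).toNat - 136⟩,
       ⟨(e.reg .rdx).toNat + 40, (e.reg .rdx).toNat + 48⟩] v.mem s_10af7er.mem := by u_same
  have hwin1 : ∀ x, x ∈ ([⟨(e.reg .rsp).toNat - 992, (e.reg .rsp).toNat - 136⟩,
      ⟨(e.reg .rdx).toNat + 40, (e.reg .rdx).toNat + 48⟩] : List Span) → gd4_Win e x := by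
    intro x hx
    simp only [List.mem_cons, List.mem_nil_iff, or_false] at hx
    unfold gd4_Win
    rcases hx with rfl | rfl
    · left
      simp only
      omega
    · right
      simp only
      omega
  have hopen1 := gd4_open_carry (cut' := Gif.L.gif_decode.ret26) hopen w_rip w_rsp (w_kept.get .r12 rfl) (w_kept.get .r13 rfl)
    (w_kept.get .rbx rfl) (w_kept.get .r15 rfl) hsame1 hwin1 w_code w_inv
  refine ReachVia.done ?_
  exact {
    open_ := hopen1
    rbp := by
      rw [w_kept.get .rbp rfl]
      exact c_rbp
  }


set_option maxRecDepth 4000 in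
set_option maxHeartbeats 4000000 in
/-- **10AF83H (ret26) … 10AF93H** (gif_driver.c:220): `r14 = rax` (the digest), `rdi = report + 56`, `__asan_store8_noabort`
(the check: `gif_decode.reportLive` for the heap `Hc`), the 8-byte store `report->digest`. Two stores since `ret26`: the check
call's return address (stack below `rsp`) and the report's field: two `gd4_Win`s; `Open` by `gd4_open_carry`. `r14` is a local. -/
theorem gd4_seg_tail (Lay : Layout) (hLay : Lay.hi = 0x1000000) (μ : Microarch) (hμ : UserX.MicroOK μ) (u₀ : State)
    (hcode : HasCodeNat Lay u₀ Gif.L.gif_decode.entry Gif.Code.code_gif_decode.nat Gif.L.gif_decode.size)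
    (H : Heap) (rest : List Obj) (frames : List (Nat × FrameLayout)) (Hc : Heap) (Fc : Forest) (e : State) (ret : Word)
    (h_asan_store8_noabort : Asan.SmallCheck Lay μ ProgX.Base.WayInv (ProgX.Base.CodeOK u₀) [.rax, .rcx, .rdx] 8
      ProgX.Base.L.__asan_store8_noabort.entry)
    (v : State) (hat : gif_decode.Held Gif.L.gif_decode.ret26 H rest frames Hc Fc u₀ e ret v) :
    ReachVia Lay μ ProgX.Base.WayInv v (gif_decode.Held Gif.L.gif_decode.at_10af93 H rest frames Hc Fc u₀ e ret) := by
  obtain ⟨hopen, c_rbp⟩ := hat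
  have hcore := hopen.core
  have hinv := hopen.inv
  have he := hcore.entry
  v_entry he
  have hpre := hcore.pre
  obtain ⟨hheap, hglob, hconsts0, hin, hrep, hrep_lo, hrep_hi⟩ := hcore.pre
  have w_rip := hcore.rip
  have c_rsp : v.reg .rsp = e.reg .rsp - 136 := hcore.rsp
  have c_rbx : v.reg .rbx = e.reg .rdx := hcore.rbx
  have w_kept : RegsKept [.rsp] v v := RegsKept.refl _ _
  have w_eq : Mem.EqOn ProgX.Base.L.textLo ProgX.Base.L.textHi u₀.mem v.mem := ProgX.Base.conv_code_eqOn hcore.code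
  have hdf := (show abiInv _ from hcore.abi).1
  have hmx := (show abiInv _ from hcore.abi).2
  have hsse := ProgX.Base.sseOK_of_abiInv hcore.abi
  have hrab := gif_decode.report_above hpre
  have hrl : LiveIn (Hc.liveObjs ++ rest) (gif_decode.framesIn frames e) (e.reg .rdx).toNat 64 :=
    gif_decode.reportLive hpre Hc _ _ _ (Nat.le_refl _) (Nat.le_refl _)
  u_walk hcode [hμ.vendor] until [Gif.L.gif_decode.at_10af93] span [ProgX.Base.L.textLo, ProgX.Base.L.textHi] side (v_side)
  case check_10af8a =>
    -- gif_driver.c:220 the store of `report->digest`: 8 bytes inside the report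
    have hun : ShadowUntouched v.mem s_10af8a.mem := by v_untouched
    exact hrl.accSmall hinv.shadow hun _ 8 (by decide) (by u_omega) (by u_omega)
  -- 0x10af93: `report->digest` is stored. Two stores since `v`: the check call's return address, the field of the report
  have hs : Mem.SameExcept
      [⟨(e.reg .rsp).toNat - 992, (e.reg .rsp).toNat - 136⟩,
       ⟨(e.reg .rdx).toNat + 56, (e.reg .rdx).toNat + 64⟩] v.mem s_10af8f.mem := by
    rw [w_mem]
    u_same
  have hwin : ∀ x, x ∈ ([⟨(e.reg .rsp).toNat - 992, (e.reg .rsp).toNat - 136⟩,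
      ⟨(e.reg .rdx).toNat + 56, (e.reg .rdx).toNat + 64⟩] : List Span) → gd4_Win e x := by
    intro x hx
    simp only [List.mem_cons, List.mem_nil_iff, or_false] at hx
    unfold gd4_Win
    rcases hx with rfl | rfl
    · left
      simp only
      omega
    · right
      simp only
      omega
  have habi : (conv u₀).inv s_10af8f := by
    refine ProgX.Base.abiInv_of ?_ ?_
    · rw [w_flags]
      exact w_df_10af8a
    · rw [w_mxcsr]
      exact hmx
  have hopen1 := gd4_open_carry (cut' := Gif.L.gif_decode.at_10af93) hopen w_rip w_rsp (w_kept.get .r12 rfl) (w_kept.get .r13 rfl)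
    (w_kept.get .rbx rfl) (w_kept.get .r15 rfl) hs hwin (ProgX.Base.conv_code_in w_eq) habi
  refine ReachVia.done ?_
  exact {
    open_ := hopen1
    rbp := by
      rw [w_kept.get .rbp rfl]
      exact c_rbp
  }

end Gif.Spec.gif_decode_4
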